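-- pv_equiv track=rewrite | github.com/morsals1/Python_2 | python 2/zad2.py | group_characters
-- ===== SOURCE A (Python) =====
-- def group_characters(input_string):
--     characters = input_string.split()
--
--     grouped = {}
--
--     for char in characters:
--         if char in grouped:
--             grouped[char].append(char)
--         else:
--             grouped[char] = [char]
--
--
--     result = list(grouped.values())
--
--     return result
-- ===== SOURCE B (Python) =====
-- def group_characters(input_string):
--     result = []
--     rest = input_string.split()
--     while rest:
--         head = rest[0]
--         result.append([u for u in rest if u == head])
--         rest = [u for u in rest if u != head]
--     return result
-- ===== Notes on version B (the rewrite author's own statement) =====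
-- stated objective: alternative
-- what changed: Replaces the dict-of-lists accumulation by a dictionary-free partition-refinement loop: repeatedly split off the head token's whole equivalence class from the remaining token list by two list scans.
import Mathlib
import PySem

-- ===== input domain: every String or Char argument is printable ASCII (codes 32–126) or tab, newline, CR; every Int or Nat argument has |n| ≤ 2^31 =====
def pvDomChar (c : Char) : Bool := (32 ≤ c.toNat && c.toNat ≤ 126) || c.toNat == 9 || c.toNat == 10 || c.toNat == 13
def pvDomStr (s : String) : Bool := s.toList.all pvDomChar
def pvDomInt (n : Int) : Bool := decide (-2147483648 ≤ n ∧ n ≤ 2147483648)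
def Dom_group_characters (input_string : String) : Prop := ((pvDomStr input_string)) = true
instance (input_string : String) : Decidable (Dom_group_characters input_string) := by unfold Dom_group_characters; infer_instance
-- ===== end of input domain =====

-- B replaces A's dict-of-lists accumulation by a dictionary-free partition-refinement
-- loop (repeatedly split off the head token's equivalence class); objective: alternative.

-- ===== PORT A =====
-- loop body of A: if char in grouped: grouped[char].append(char) else: grouped[char] = [char]
def pvStepA (d : PySem.Dict String (List String)) (c : String) : PySem.Dict String (List String) :=
  if d.contains c then d.insert c (d.getD c [] ++ [c]) else d.insert c [c]

def group_characters (input_string : String) : List (List String) :=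
  let characters := PySem.Str.split₀ input_string
  let grouped := characters.foldl pvStepA PySem.Dict.empty
  let result := grouped.values
  result

-- ===== PORT B =====
-- B's while loop: split off the head's equivalence class, recurse on the rest
def pvGo : List String → List (List String)
  | [] => []
  | t :: ts =>
      ((t :: ts).filter (fun u => u == t)) :: pvGo ((t :: ts).filter (fun u => u != t))
termination_by l => l.length
decreasing_by
  simp only [List.filter_cons, bne_self_eq_false, List.length_cons]
  exact Nat.lt_succ_of_le (List.length_filter_le _ _)

def group_characters_alt (input_string : String) : List (List String) :=
  pvGo (PySem.Str.split₀ input_string)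

-- ===== PRECONDITION & SPEC =====
def Spec_group_characters (input_string : String) (out : List (List String)) : Prop := out = group_characters_alt input_string
instance (input_string : String) (out : List (List String)) : Decidable (Spec_group_characters input_string out) := by unfold Spec_group_characters; infer_instance

-- ===== CLAIM (what is proved, stated in full; the proofs are below) =====
def Claim_equal_group_characters : Prop := ∀ (input_string : String), Dom_group_characters input_string → Spec_group_characters input_string (group_characters input_string)

-- ===== LEMMAS AND PROOFS =====

-- canonical form: first-occurrence-distinct tokens, each mapped to its occurrence list
def pvG (ts : List String) : List (List String) :=
  (PySem.Set.ofList ts).map (fun k => ts.filter (fun u => u == k))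

-- A's loop step is a Dict.modify
theorem pvStepA_eq_modify (d : PySem.Dict String (List String)) (c : String) :
    pvStepA d c = d.modify c [] (fun g => g ++ [c]) := by
  unfold pvStepA PySem.Dict.modify
  by_cases h : d.contains c = true
  · simp [h]
  · have h' : d.contains c = false := Bool.eq_false_iff.mpr h
    simp [h, PySem.Dict.getD_of_not_contains _ _ h']

theorem pvA_eq_pvG (ts : List String) :
    (ts.foldl pvStepA PySem.Dict.empty).values = pvG ts := by
  have hstep : pvStepA = fun (d : PySem.Dict String (List String)) c => d.modify c [] (fun g => g ++ [c]) := by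
    funext d c; exact pvStepA_eq_modify d c
  rw [hstep]
  have hkeys : (ts.foldl (fun d c => d.modify c [] (fun g => g ++ [c])) PySem.Dict.empty).keys
      = PySem.Set.ofList ts := by
    have h := PySem.Dict.keys_foldl_modify ts [] (fun _ c g => g ++ [c]) PySem.Dict.empty
    simpa [PySem.Set.update_nil_left, PySem.Dict.keys_empty] using h
  have hmap : ts.foldl (fun d c => d.modify c [] (fun g => g ++ [c])) PySem.Dict.empty
      = (ts.map (fun t => (t, t))).foldl (fun d p => d.modify p.1 [] (fun g => g ++ [p.2])) PySem.Dict.empty := by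
    rw [List.foldl_map]
  have hgetD : ∀ c, (ts.foldl (fun d c => d.modify c [] (fun g => g ++ [c])) PySem.Dict.empty).getD c []
      = ts.filter (fun u => u == c) := by
    intro c
    rw [hmap, PySem.Dict.getD_foldl_modify_append]
    simp [List.filter_map, Function.comp_def]
  rw [PySem.Dict.values_eq_map_keys _ (by rw [hkeys]; exact PySem.Set.nodup_ofList ts) [], hkeys]
  unfold pvG
  exact List.map_congr_left fun k _ => hgetD k

theorem pv_ofList_filter (p : String → Bool) (l : List String) :
    PySem.Set.ofList (l.filter p) = (PySem.Set.ofList l).filter p := by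
  induction l with
  | nil => rfl
  | cons u us ih =>
    by_cases h : p u = true
    · simp only [List.filter_cons, h, if_true, PySem.Set.ofList_cons, ih, PySem.Set.discard,
        List.filter_filter]
      refine congrArg (u :: ·) (List.filter_congr fun a _ => ?_)
      rw [Bool.and_comm]
    · have h' : p u = false := Bool.eq_false_iff.mpr h
      simp [h', PySem.Set.ofList_cons, ih, PySem.Set.discard, List.filter_filter]
      refine List.filter_congr fun a _ => ?_
      by_cases ha : a = u
      · subst ha; simp [h']
      · simp [ha]

theorem pvGo_eq_pvG (ts : List String) : pvGo ts = pvG ts := by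
  induction ts using pvGo.induct with
  | case1 => simp [pvGo, pvG]
  | case2 t ts ih =>
    rw [pvGo, ih]
    unfold pvG
    rw [PySem.Set.ofList_cons]
    simp only [List.map_cons]
    refine congrArg (_ :: ·) ?_
    have hdis : (PySem.Set.ofList ts).discard t
        = PySem.Set.ofList ((t :: ts).filter (fun u => u != t)) := by
      rw [pv_ofList_filter, PySem.Set.ofList_cons]
      simp only [PySem.Set.discard, List.filter_cons, List.filter_filter, bne_self_eq_false,
        Bool.false_eq_true, if_false]
      refine List.filter_congr fun a _ => ?_
      by_cases ha : a = t
      · subst ha; simp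
      · simp [ha]
    rw [hdis]
    refine List.map_congr_left fun k hk => ?_
    have hk' : k ∈ (t :: ts).filter (fun u => u != t) := (PySem.Set.mem_ofList _ _).mp hk
    have hkt : (k == t) = false := by
      rcases List.mem_filter.mp hk' with ⟨-, hbe⟩
      simpa using hbe
    rw [List.filter_filter]
    refine List.filter_congr fun u _ => ?_
    by_cases h : u = k
    · subst h
      have hne : u ≠ t := by simpa using hkt
      simp [hne]
    · simp [h]

-- ===== VERDICT (by name: the statement is the Claim_ definition above) =====
theorem group_characters_spec : Claim_equal_group_characters := by
  intro s _
  unfold Spec_group_characters group_characters group_characters_alt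
  simp only []
  rw [pvA_eq_pvG, pvGo_eq_pvG]
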